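-- pv_equiv track=rewrite | github.com/collinsakenga/codewars_solutions | 6 kyu/6 kyu_80's Kids #4 Legends of the Hidden Temple.py | mark_spot
-- ===== SOURCE A (Python) =====
-- def mark_spot(n):
--     if not isinstance(n, int) or n<=0 or n%2==0:
--         return "?"
--     res=[]
--     line=list("X"+" "*(n*2-3)+"X")
--     for i in range(n//2):
--         res.append("".join(line).rstrip())
--         line[i*2], line[(i+1)*2]=line[(i+1)*2], line[i*2]
--         line[-(i*2)-1], line[-((i+1)*2)-1]=line[-((i+1)*2)-1], line[-(i*2)-1]
--     return "\n".join(res+[" "*(n-1)+"X"]+res[::-1])+"\n"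
-- ===== SOURCE B (Python) =====
-- def mark_spot(n):
--     if not isinstance(n, int) or n <= 0 or n % 2 == 0:
--         return "?"
--     rows = []
--     for r in range(n):
--         d = 2 * min(r, n - 1 - r)
--         right = 2 * n - 2 - d
--         row = [" "] * (right + 1)
--         row[d] = "X"
--         row[right] = "X"
--         rows.append("".join(row))
--     return "\n".join(rows) + "\n"
-- ===== Notes on version B (the rewrite author's own statement) =====
-- stated objective: simpler
-- what changed: B computes each row independently from its closed-form column position (twice the distance to the nearer edge, the middle row degenerating to a single X), instead of A's stateful sweep that mutates one line buffer, snapshots it with rstrip each iteration and mirrors the collected rows with a reversed slice.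
import Mathlib
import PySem

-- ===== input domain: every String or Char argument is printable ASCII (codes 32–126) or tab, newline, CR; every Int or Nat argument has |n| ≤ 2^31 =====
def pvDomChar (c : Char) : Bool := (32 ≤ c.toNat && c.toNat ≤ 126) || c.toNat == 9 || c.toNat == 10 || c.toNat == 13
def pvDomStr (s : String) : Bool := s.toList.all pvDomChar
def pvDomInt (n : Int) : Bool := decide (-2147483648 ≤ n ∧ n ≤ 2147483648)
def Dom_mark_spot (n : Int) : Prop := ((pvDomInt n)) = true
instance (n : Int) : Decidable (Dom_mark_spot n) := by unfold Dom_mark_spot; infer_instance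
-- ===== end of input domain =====

-- B computes every row directly from a closed-form column position instead of mutating
-- one line buffer and mirroring the collected rows with res[::-1]; objective: simpler.

-- ===== PORT A =====
-- A's loop body: append the rstripped snapshot of `line`, then swap the two X's outward.
-- Strings are ported at the code-point level (List Char) via PySem.Chars, exact on ASCII.
def stepA (st : List (List Char) × List Char) (i : Nat) : List (List Char) × List Char :=
  -- res.append("".join(line).rstrip())
  let res := st.1 ++ [PySem.Chars.rstrip st.2]
  let line := st.2
  -- line[i*2], line[(i+1)*2] = line[(i+1)*2], line[i*2]  (simultaneous; indices in range)
  let x := line.getD (i * 2) ' '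
  let y := line.getD ((i + 1) * 2) ' '
  let line := (line.set (i * 2) y).set ((i + 1) * 2) x
  -- line[-(i*2)-1], line[-((i+1)*2)-1] = … : negative index -k-1 addresses len-1-k, in range here
  let p := line.length - i * 2 - 1
  let q := line.length - (i + 1) * 2 - 1
  let x2 := line.getD p ' '
  let y2 := line.getD q ' '
  (res, (line.set p y2).set q x2)

def mark_spot (n : Int) : String :=
  if n ≤ 0 ∨ PySem.Int.mod n 2 = 0 then "?" else
  -- line = list("X" + " "*(n*2-3) + "X")   (a negative repeat count yields the empty string)
  let line0 : List Char := 'X' :: (List.replicate ((n * 2 - 3).toNat) ' ' ++ ['X'])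
  let st := (List.range ((PySem.Int.floordiv n 2).toNat)).foldl stepA ([], line0)
  -- "\n".join(res + [" "*(n-1)+"X"] + res[::-1]) + "\n"
  String.mk (PySem.Chars.join ['\n']
    (st.1 ++ [List.replicate ((n - 1).toNat) ' ' ++ ['X']] ++ st.1.reverse) ++ ['\n'])

-- ===== PORT B =====
-- one row of B: spaces of length right+1 with 'X' placed at columns d and right
def bRow (N r : Nat) : List Char :=
  let d := 2 * min r (N - 1 - r)
  let right := 2 * N - 2 - d
  ((List.replicate (right + 1) ' ').set d 'X').set right 'X'

def mark_spot_alt (n : Int) : String :=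
  if n ≤ 0 ∨ PySem.Int.mod n 2 = 0 then "?" else
  let rows := (List.range n.toNat).foldl (fun acc r => acc ++ [bRow n.toNat r]) []
  String.mk (PySem.Chars.join ['\n'] rows ++ ['\n'])

-- ===== PRECONDITION & SPEC =====
def Spec_mark_spot (n : Int) (out : String) : Prop := out = mark_spot_alt n
instance (n : Int) (out : String) : Decidable (Spec_mark_spot n out) := by unfold Spec_mark_spot; infer_instance

-- ===== CLAIM (what is proved, stated in full; the proofs are below) =====
def Claim_equal_mark_spot : Prop := ∀ (n : Int), Dom_mark_spot n → Spec_mark_spot n (mark_spot n)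

-- ===== LEMMAS AND PROOFS =====

-- canonical row shapes: X at column a and at column a+b+1 (last); the single-X middle row
def rowC (a b : Nat) : List Char :=
  List.replicate a ' ' ++ 'X' :: (List.replicate b ' ' ++ ['X'])

def midC (k : Nat) : List Char := List.replicate k ' ' ++ ['X']

-- A's line buffer after i iterations: X at 2i and 2N-2-2i, spaces elsewhere, length 2N-1
def lineC (N i : Nat) : List Char := rowC (2 * i) (2 * N - 3 - 4 * i) ++ List.replicate (2 * i) ' '

lemma length_rowC (a b : Nat) : (rowC a b).length = a + b + 2 := by
  simp [rowC]; omega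

lemma getElem_rowC (a b j : Nat) (hj : j < (rowC a b).length) :
    (rowC a b)[j] = if j = a ∨ j = a + b + 1 then 'X' else ' ' := by
  have hj' : j < a + b + 2 := by simpa [rowC] using hj
  simp only [rowC, List.getElem_append, List.getElem_cons, List.getElem_replicate,
    List.length_replicate]
  split_ifs <;> first | rfl | (exfalso; omega)

lemma length_lineC (N i : Nat) (h : 4 * i + 3 ≤ 2 * N) : (lineC N i).length = 2 * N - 1 := by
  simp [lineC, length_rowC]; omega

lemma getElem_lineC (N i j : Nat) (h : 4 * i + 3 ≤ 2 * N) (hj : j < (lineC N i).length) :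
    (lineC N i)[j] = if j = 2 * i ∨ j = 2 * N - 2 - 2 * i then 'X' else ' ' := by
  have hj' : j < 2 * N - 1 := by rwa [length_lineC N i h] at hj
  simp only [lineC, List.getElem_append, length_rowC]
  by_cases h1 : j < 2 * i + (2 * N - 3 - 4 * i) + 2
  · simp only [h1, dite_true]
    rw [getElem_rowC]
    split_ifs <;> first | rfl | (exfalso; omega)
  · simp only [h1, reduceDIte]
    rw [List.getElem_replicate]
    split_ifs <;> first | rfl | (exfalso; omega)

lemma dropWhile_replicate_sp (c : Nat) (l : List Char) :
    List.dropWhile PySem.Chars.isspace (List.replicate c ' ' ++ l) =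
      List.dropWhile PySem.Chars.isspace l := by
  induction c with
  | zero => simp
  | succ k ih => simpa [List.replicate_succ, List.dropWhile_cons] using ih

lemma rstrip_lineC (N i : Nat) (h : 4 * i + 3 ≤ 2 * N) :
    PySem.Chars.rstrip (lineC N i) = rowC (2 * i) (2 * N - 3 - 4 * i) := by
  simp only [PySem.Chars.rstrip, lineC, rowC, List.reverse_append, List.reverse_replicate,
    List.reverse_cons, List.append_assoc]
  rw [dropWhile_replicate_sp]
  simp only [List.reverse_nil, List.nil_append, List.singleton_append]
  rw [List.dropWhile_cons_of_neg (by decide)]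
  simp [List.reverse_cons, List.reverse_append]

lemma getD_lineC (N i j : Nat) (h : 4 * i + 3 ≤ 2 * N) (hj : j < 2 * N - 1) :
    (lineC N i).getD j ' ' = if j = 2 * i ∨ j = 2 * N - 2 - 2 * i then 'X' else ' ' := by
  have hl : j < (lineC N i).length := by rw [length_lineC N i h]; omega
  rw [List.getD_eq_getElem?_getD, List.getElem?_eq_getElem hl]
  simp [getElem_lineC N i j h hl]

lemma stepA_fst (N k : Nat) (acc : List (List Char)) (h : 4 * k + 3 ≤ 2 * N) :
    (stepA (acc, lineC N k) k).1 = acc ++ [rowC (2 * k) (2 * N - 3 - 4 * k)] := by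
  show acc ++ [PySem.Chars.rstrip (lineC N k)] = _
  rw [rstrip_lineC N k h]

lemma stepA_snd (N k : Nat) (acc : List (List Char)) (h : 4 * (k + 1) + 3 ≤ 2 * N) :
    (stepA (acc, lineC N k) k).2 = lineC N (k + 1) := by
  have h0 : 4 * k + 3 ≤ 2 * N := by omega
  have hlen : (lineC N k).length = 2 * N - 1 := length_lineC N k h0
  have hx : (lineC N k).getD (k * 2) ' ' = 'X' := by
    rw [getD_lineC N k (k * 2) h0 (by omega)]; exact if_pos (Or.inl (by omega))
  have hy : (lineC N k).getD ((k + 1) * 2) ' ' = ' ' := by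
    rw [getD_lineC N k ((k + 1) * 2) h0 (by omega)]; exact if_neg (by omega)
  have hL2 : (((lineC N k).set (k * 2) ' ').set ((k + 1) * 2) 'X').length = 2 * N - 1 := by
    simp [hlen]
  have hgd : ∀ j : Nat, j < 2 * N - 1 → j ≠ k * 2 → j ≠ (k + 1) * 2 →
      (((lineC N k).set (k * 2) ' ').set ((k + 1) * 2) 'X').getD j ' ' =
        (if j = 2 * k ∨ j = 2 * N - 2 - 2 * k then 'X' else ' ') := by
    intro j hj hne1 hne2
    have hl : j < (((lineC N k).set (k * 2) ' ').set ((k + 1) * 2) 'X').length := by rw [hL2]; omega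
    rw [List.getD_eq_getElem?_getD, List.getElem?_eq_getElem hl]
    rw [List.getElem_set, List.getElem_set]
    rw [if_neg (by omega), if_neg (by omega)]
    exact getElem_lineC N k j h0 (by rw [hlen]; omega)
  simp only [stepA, hx, hy, List.length_set, hlen]
  rw [hgd (2 * N - 1 - (k + 1) * 2 - 1) (by omega) (by omega) (by omega),
      hgd (2 * N - 1 - k * 2 - 1) (by omega) (by omega) (by omega)]
  rw [if_neg (by omega), if_pos (Or.inr (by omega))]
  apply List.ext_getElem
  · simp [hlen, length_lineC N (k + 1) h]
  · intro j h1 h2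
    have hj : j < 2 * N - 1 := by simpa [hlen] using h1
    rw [getElem_lineC N (k + 1) j h h2]
    simp only [List.getElem_set]
    rw [getElem_lineC N k j h0 (by rw [hlen]; omega)]
    split_ifs <;> first | rfl | (exfalso; omega)

lemma loopA (N : Nat) (hodd : N % 2 = 1) :
    ∀ (c k : Nat) (acc : List (List Char)), k + c = N / 2 →
      ((List.range' k c).foldl stepA (acc, lineC N k)).1
        = acc ++ (List.range' k c).map (fun i => rowC (2 * i) (2 * N - 3 - 4 * i)) := by
  intro c
  induction c with
  | zero => intro k acc _; simp
  | succ c ih =>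
    intro k acc hk
    have h4 : 4 * k + 3 ≤ 2 * N := by omega
    rw [List.range'_succ, List.foldl_cons, List.map_cons]
    cases c with
    | zero =>
      simp only [List.range'_zero, List.foldl_nil, List.map_nil]
      rw [stepA_fst N k acc h4]
    | succ c' =>
      have hpair : stepA (acc, lineC N k) k
          = (acc ++ [rowC (2 * k) (2 * N - 3 - 4 * k)], lineC N (k + 1)) :=
        Prod.ext_iff.mpr ⟨stepA_fst N k acc h4, stepA_snd N k acc (by omega)⟩
      rw [hpair, ih (k + 1) _ (by omega)]
      simp

lemma setset_rowC (a b : Nat) :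
    ((List.replicate (a + b + 2) ' ').set a 'X').set (a + b + 1) 'X' = rowC a b := by
  apply List.ext_getElem
  · simp [length_rowC]
  · intro j h1 h2
    rw [getElem_rowC]
    simp only [List.getElem_set, List.getElem_replicate]
    split_ifs <;> first | rfl | (exfalso; omega)

lemma set_last (k : Nat) : (List.replicate (k + 1) ' ').set k 'X' = midC k := by
  apply List.ext_getElem
  · simp [midC]
  · intro j h1 h2
    simp only [List.getElem_set, List.getElem_replicate, midC, List.getElem_append,
      List.length_replicate]
    simp only [midC, List.length_append, List.length_replicate, List.length_singleton] at h2
    split_ifs <;> first | rfl | (exfalso; omega) | simp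

lemma bRow_low (N r : Nat) (h : 2 * r + 1 < N) :
    bRow N r = rowC (2 * r) (2 * N - 3 - 4 * r) := by
  have hmin : min r (N - 1 - r) = r := by omega
  simp only [bRow, hmin]
  rw [show 2 * N - 2 - 2 * r + 1 = 2 * r + (2 * N - 3 - 4 * r) + 2 from by omega,
      show 2 * N - 2 - 2 * r = 2 * r + (2 * N - 3 - 4 * r) + 1 from by omega,
      setset_rowC]

lemma bRow_mid (m : Nat) : bRow (2 * m + 1) m = midC (2 * m) := by
  have hmin : min m (2 * m + 1 - 1 - m) = m := by omega
  simp only [bRow, hmin]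
  rw [show 2 * (2 * m + 1) - 2 - 2 * m = 2 * m from by omega, List.set_set,
      show 2 * m + 1 = (2 * m) + 1 from rfl, set_last]

lemma bRow_sym (N r : Nat) (hr : r < N) : bRow N r = bRow N (N - 1 - r) := by
  simp only [bRow]
  rw [show N - 1 - (N - 1 - r) = r from by omega, Nat.min_comm]

lemma rev_map_range (g : Nat → List Char) (m : Nat) :
    (List.map (fun j => g (m - 1 - j)) (List.range m)) = (List.map g (List.range m)).reverse := by
  apply List.ext_getElem
  · simp
  · intro j h1 h2
    simp only [List.getElem_map, List.getElem_range, List.getElem_reverse, List.length_map,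
      List.length_range]
    try (congr 1; omega)

lemma rows_eq (m : Nat) :
    List.map (bRow (2 * m + 1)) (List.range (2 * m + 1)) =
      (List.range m).map (fun i => rowC (2 * i) (2 * (2 * m + 1) - 3 - 4 * i)) ++ [midC (2 * m)]
        ++ ((List.range m).map (fun i => rowC (2 * i) (2 * (2 * m + 1) - 3 - 4 * i))).reverse := by
  rw [show 2 * m + 1 = (m + 1) + m from by omega, List.range_add, List.map_append,
      List.range_succ, List.map_append]
  have e1 : List.map (bRow ((m + 1) + m)) (List.range m)
      = List.map (fun i => rowC (2 * i) (2 * ((m + 1) + m) - 3 - 4 * i)) (List.range m) := by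
    apply List.map_congr_left; intro i hi
    simp only [List.mem_range] at hi
    exact bRow_low _ i (by omega)
  have e2 : List.map (bRow ((m + 1) + m)) [m] = [midC (2 * m)] := by
    simp only [List.map_cons, List.map_nil]
    rw [show (m + 1) + m = 2 * m + 1 from by omega, bRow_mid]
  have e3 : List.map (bRow ((m + 1) + m)) (List.map (fun x => (m + 1) + x) (List.range m))
      = (List.map (fun i => rowC (2 * i) (2 * ((m + 1) + m) - 3 - 4 * i)) (List.range m)).reverse := by
    rw [List.map_map, ← rev_map_range]
    apply List.map_congr_left; intro j hj
    simp only [List.mem_range] at hj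
    simp only [Function.comp_apply]
    rw [show (m + 1) + m = 2 * m + 1 from by omega, bRow_sym _ _ (by omega),
        show 2 * m + 1 - 1 - (m + 1 + j) = m - 1 - j from by omega,
        bRow_low _ _ (by omega)]
  rw [e1, e2, e3]

lemma fold_app (f : Nat → List Char) :
    ∀ (l : List Nat) (acc : List (List Char)),
      l.foldl (fun acc r => acc ++ [f r]) acc = acc ++ l.map f := by
  intro l
  induction l with
  | nil => simp
  | cons x t ih => intro acc; simp [List.foldl_cons, ih]

-- ===== VERDICT (by name: the statement is the Claim_ definition above) =====
theorem mark_spot_spec : Claim_equal_mark_spot := by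
  intro n _
  unfold Spec_mark_spot mark_spot mark_spot_alt
  by_cases hg : n ≤ 0 ∨ PySem.Int.mod n 2 = 0
  · rw [if_pos hg, if_pos hg]
  · rw [if_neg hg, if_neg hg]
    have h1 : 0 < n := not_le.mp (fun h => hg (Or.inl h))
    have h2 : PySem.Int.mod n 2 ≠ 0 := fun h => hg (Or.inr h)
    have hmod : n.toNat % 2 = 1 := by
      simp only [PySem.Int.mod] at h2
      rw [Int.fmod_eq_emod, if_pos (Or.inl (by norm_num))] at h2
      omega
    have hfd : (PySem.Int.floordiv n 2).toNat = n.toNat / 2 := by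
      simp only [PySem.Int.floordiv]
      rw [Int.fdiv_eq_ediv, if_pos (Or.inl (by norm_num))]
      omega
    obtain ⟨m, hm⟩ : ∃ m, n.toNat = 2 * m + 1 := ⟨n.toNat / 2, by omega⟩
    have hfd' : (PySem.Int.floordiv n 2).toNat = m := by rw [hfd, hm]; omega
    have hline0 : ('X' :: (List.replicate ((n * 2 - 3).toNat) ' ' ++ ['X'])) = lineC (2 * m + 1) 0 := by
      rw [show (n * 2 - 3).toNat = 2 * (2 * m + 1) - 3 from by omega]
      simp [lineC, rowC]
    rw [hm, hline0, hfd']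
    dsimp only []
    rw [List.range_eq_range', loopA (2 * m + 1) (by omega) m 0 [] (by omega)]
    simp only [List.nil_append]
    rw [← List.range_eq_range']
    rw [fold_app (bRow (2 * m + 1)) (List.range (2 * m + 1)) []]
    simp only [List.nil_append]
    rw [show (n - 1).toNat = 2 * m from by omega, rows_eq m]
    rfl
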